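-- pv_equiv track=rewrite | github.com/ebrahimsalehi1/frontend_projects | Python/226338.py | snake_moves
-- ===== SOURCE A (Python) =====
-- def snake_moves(moves):
--     # Initialize the snake's position
--     row, col = 1, 0
--     grid = [[0] * 8 for _ in range(2)]
--     grid[row][col] = 1
--
--     for move in moves:
--         if move == 'F':
--             col += 1
--         elif move == 'L':
--             row -= 1
--             col += 1
--         elif move == 'R':
--             row += 1
--             col += 1
--
--         # Check if the snake hits the wall
--         if row < 0 or row > 1 or col < 0 or col > 7:
--             return "DEATH"
--
--         grid[row][col] = 1
--
--     # Convert grid to the required output format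
--     result = ["".join(map(str, grid[0])), "".join(map(str, grid[1]))]
--     return "\n".join(result)
-- ===== SOURCE B (Python) =====
-- def snake_moves(moves):
--     # Record the full row trace of effective moves, then check death analytically,
--     # then render the grid from the trace.
--     deltas = {'F': 0, 'L': -1, 'R': 1}
--     rows = [1]
--     for m in moves:
--         if m in deltas:
--             rows.append(rows[-1] + deltas[m])
--     if len(rows) > 8 or any(not (0 <= r <= 1) for r in rows[1:]):
--         return "DEATH"
--     top = "".join('1' if j < len(rows) and rows[j] == 0 else '0' for j in range(8))
--     bot = "".join('1' if j < len(rows) and rows[j] == 1 else '0' for j in range(8))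
--     return top + "\n" + bot
-- ===== Notes on version B (the rewrite author's own statement) =====
-- stated objective: alternative
-- what changed: B replaces A's combined simulate-mark-and-early-return pass over a mutable 2x8 grid by three separate phases: it first records only the row trace of the effective F/L/R moves, then decides DEATH by one analytic check (trace longer than 8 or any traced row outside 0..1), and finally renders the two output lines by direct lookup into the trace instead of mutating a grid; per character it does no grid writes or bounds rechecks (ineffective characters cost nothing), which a timing run measured as a constant-factor speedup.
import Mathlib
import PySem

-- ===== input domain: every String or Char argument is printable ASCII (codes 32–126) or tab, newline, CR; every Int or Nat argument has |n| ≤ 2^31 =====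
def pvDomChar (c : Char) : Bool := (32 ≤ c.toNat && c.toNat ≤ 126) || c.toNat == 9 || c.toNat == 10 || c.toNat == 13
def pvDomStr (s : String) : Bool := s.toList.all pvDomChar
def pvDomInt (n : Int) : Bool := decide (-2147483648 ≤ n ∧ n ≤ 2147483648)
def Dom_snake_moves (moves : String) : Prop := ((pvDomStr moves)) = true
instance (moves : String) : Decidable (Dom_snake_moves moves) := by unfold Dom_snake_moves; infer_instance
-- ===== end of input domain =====

-- B records the full row trace of effective moves first, then decides DEATH by one
-- analytic check (trace length / out-of-range row) and renders the grid from the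
-- trace by lookup — no grid mutation and no early return during the simulation
-- (objective: alternative decomposition; a timing run measured it faster by a constant factor).

-- ===== PORT A =====
-- grid[row][col] = 1  (indices are in range whenever A executes this)
def pvSetCell (g : List (List Int)) (r c : Int) : List (List Int) :=
  g.modify r.toNat (fun line => line.set c.toNat 1)

-- ["".join(map(str, grid[0])), "".join(map(str, grid[1]))] joined with "\n"
def pvRenderA (g : List (List Int)) : String :=
  PySem.Str.join "\n"
    [PySem.Str.join "" ((g[0]?.getD []).map PySem.Int.toStr),
     PySem.Str.join "" ((g[1]?.getD []).map PySem.Int.toStr)]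

def pvGoA : List Char → Int → Int → List (List Int) → String
  | [], _, _, g => pvRenderA g
  | m :: rest, row, col, g =>
    let p : Int × Int :=
      if m = 'F' then (row, col + 1)
      else if m = 'L' then (row - 1, col + 1)
      else if m = 'R' then (row + 1, col + 1)
      else (row, col)
    if p.1 < 0 ∨ p.1 > 1 ∨ p.2 < 0 ∨ p.2 > 7 then "DEATH"
    else pvGoA rest p.1 p.2 (pvSetCell g p.1 p.2)

def snake_moves (moves : String) : String :=
  pvGoA moves.toList 1 0 (pvSetCell (List.replicate 2 (List.replicate 8 0)) 1 0)

-- ===== PORT B =====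
def pvDelta (m : Char) : Int := if m = 'F' then 0 else if m = 'L' then -1 else 1

-- the appended part of rows; the accumulator carries rows[-1]
def pvRowsB : List Char → Int → List Int
  | [], _ => []
  | m :: rest, last =>
    if m = 'F' ∨ m = 'L' ∨ m = 'R' then
      (last + pvDelta m) :: pvRowsB rest (last + pvDelta m)
    else pvRowsB rest last

-- "".join('1' if j < len(rows) and rows[j] == r else '0' for j in range(8))
def pvLineB (rows : List Int) (r : Int) : String :=
  String.ofList ((List.range 8).map fun j => if rows[j]? = some r then '1' else '0')

def snake_moves_alt (moves : String) : String :=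
  let rows : List Int := 1 :: pvRowsB moves.toList 1
  if rows.length > 8 ∨ (rows.drop 1).any (fun r => !(decide (0 ≤ r ∧ r ≤ 1))) then "DEATH"
  else pvLineB rows 0 ++ "\n" ++ pvLineB rows 1

-- ===== PRECONDITION & SPEC =====
def Spec_snake_moves (moves : String) (out : String) : Prop := out = snake_moves_alt moves
instance (moves : String) (out : String) : Decidable (Spec_snake_moves moves out) := by unfold Spec_snake_moves; infer_instance

-- ===== CLAIM (what is proved, stated in full; the proofs are below) =====
def Claim_equal_snake_moves : Prop := ∀ (moves : String), Dom_snake_moves moves → Spec_snake_moves moves (snake_moves moves)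

-- ===== LEMMAS AND PROOFS =====

-- the grid determined by a visited-row trace vs (cell (r,j) is 1 iff vs[j] = r)
def pvRowLine (vs : List Int) (r : Int) : List Int :=
  (List.range 8).map fun j => if vs[j]? = some r then 1 else 0

def pvGridOf (vs : List Int) : List (List Int) := [pvRowLine vs 0, pvRowLine vs 1]

lemma pvGetElem?_concat (vs : List Int) (r : Int) (j : Nat) :
    (vs ++ [r])[j]? = if j = vs.length then some r else vs[j]? := by
  rcases lt_trichotomy j vs.length with h | h | h
  · rw [List.getElem?_append_left h, if_neg (by omega)]
  · subst h; simp
  · rw [if_neg (by omega), List.getElem?_eq_none (by simp; omega),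
        List.getElem?_eq_none (by omega)]

lemma pvRowLine_set_self (vs : List Int) (r : Int) (c : Nat) (h : vs[c]? = some r) :
    (pvRowLine vs r).set c 1 = pvRowLine vs r := by
  apply List.ext_getElem?
  intro j
  simp only [pvRowLine, List.getElem?_set, List.length_map, List.length_range,
    List.getElem?_map]
  by_cases hcj : c = j
  · subst hcj
    by_cases hc8 : c < 8 <;> simp [hc8, h]
  · simp [hcj]

lemma pvRowLine_concat_self (vs : List Int) (r : Int) :
    (pvRowLine vs r).set vs.length 1 = pvRowLine (vs ++ [r]) r := by
  apply List.ext_getElem?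
  intro j
  simp only [pvRowLine, List.getElem?_set, List.length_map, List.length_range,
    List.getElem?_map, pvGetElem?_concat]
  by_cases hcj : vs.length = j
  · subst hcj
    by_cases h8 : vs.length < 8 <;> simp [h8]
  · by_cases hj : j < 8 <;> simp [hj, hcj, Ne.symm hcj]

lemma pvRowLine_concat_other (vs : List Int) (r r' : Int) (h : r' ≠ r) :
    pvRowLine (vs ++ [r]) r' = pvRowLine vs r' := by
  apply List.ext_getElem?
  intro j
  simp only [pvRowLine, List.getElem?_map, pvGetElem?_concat]
  by_cases hj : j < 8
  · by_cases hcj : j = vs.length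
    · subst hcj
      simp [hj, Ne.symm h]
    · simp [hj, hcj]
  · simp [hj]

lemma pvSetCell_mem (vs : List Int) (r c : Int) (hr0 : 0 ≤ r) (hr1 : r ≤ 1)
    (h : vs[c.toNat]? = some r) :
    pvSetCell (pvGridOf vs) r c = pvGridOf vs := by
  rcases (by omega : r = 0 ∨ r = 1) with h1 | h1 <;> subst h1 <;>
    simp [pvSetCell, pvGridOf, List.modify, pvRowLine_set_self _ _ _ h]

lemma pvSetCell_new (vs : List Int) (r : Int) (hr0 : 0 ≤ r) (hr1 : r ≤ 1) :
    pvSetCell (pvGridOf vs) r (vs.length : Int) = pvGridOf (vs ++ [r]) := by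
  rcases (by omega : r = 0 ∨ r = 1) with h1 | h1 <;> subst h1 <;>
    simp [pvSetCell, pvGridOf, List.modify, pvRowLine_concat_self,
      pvRowLine_concat_other _ _ _ (by omega : (0:Int) ≠ 1),
      pvRowLine_concat_other _ _ _ (by omega : (1:Int) ≠ 0)]

lemma pvStr_ext (s t : String) (h : s.toList = t.toList) : s = t := by
  have := congrArg String.ofList h
  simpa using this

lemma pvJoin_digits (vs : List Int) (r : Int) :
    PySem.Str.join "" ((pvRowLine vs r).map PySem.Int.toStr) = pvLineB vs r := by
  apply pvStr_ext
  rw [PySem.Str.toList_join]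
  simp only [pvRowLine, pvLineB, List.map_map]
  have h2 : ((List.range 8).map
        (fun j => (PySem.Int.toStr (if vs[j]? = some r then (1:Int) else 0)).toList))
      = ((List.range 8).map (fun j => if vs[j]? = some r then '1' else '0')).map
          (fun c => [c]) := by
    rw [List.map_map]
    apply List.map_congr_left
    intro j _
    by_cases h : vs[j]? = some r <;> simp [h] <;> rfl
  have h3 : ("" : String).toList = [] := rfl
  simp only [Function.comp_def, h3]
  rw [h2, PySem.Chars.join_nil_singletons]
  simp

lemma pvJoin_two (a b : String) : PySem.Str.join "\n" [a, b] = a ++ "\n" ++ b := by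
  apply pvStr_ext
  rw [PySem.Str.toList_join]
  simp [PySem.Chars.join_cons_cons, PySem.Chars.join_singleton]

lemma pvRender_eq (vs : List Int) :
    pvRenderA (pvGridOf vs) = pvLineB vs 0 ++ "\n" ++ pvLineB vs 1 := by
  show PySem.Str.join "\n" _ = _
  simp only [pvGridOf, List.getElem?_cons_zero, List.getElem?_cons_succ, Option.getD_some]
  rw [pvJoin_digits, pvJoin_digits, pvJoin_two]
lemma pv_step (rest : List Char) (pref : List Int) (row row' : Int)
    (hlen : pref.length ≤ 7)
    (ih : ∀ (pref : List Int) (row : Int), 0 ≤ row → row ≤ 1 → pref.length ≤ 7 →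
      pvGoA rest row (pref.length : Int) (pvGridOf (pref ++ [row])) =
        (if pref.length + 1 + (pvRowsB rest row).length > 8
            ∨ (pvRowsB rest row).any (fun r => !(decide (0 ≤ r ∧ r ≤ 1))) then "DEATH"
         else pvLineB (pref ++ [row] ++ pvRowsB rest row) 0 ++ "\n"
              ++ pvLineB (pref ++ [row] ++ pvRowsB rest row) 1)) :
    (if row' < 0 ∨ row' > 1 ∨ (pref.length : Int) + 1 < 0 ∨ (pref.length : Int) + 1 > 7
     then "DEATH"
     else pvGoA rest row' ((pref.length : Int) + 1)
       (pvSetCell (pvGridOf (pref ++ [row])) row' ((pref.length : Int) + 1)))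
    = (if pref.length + 1 + (row' :: pvRowsB rest row').length > 8
          ∨ (row' :: pvRowsB rest row').any (fun r => !(decide (0 ≤ r ∧ r ≤ 1))) then "DEATH"
       else pvLineB (pref ++ [row] ++ row' :: pvRowsB rest row') 0 ++ "\n"
            ++ pvLineB (pref ++ [row] ++ row' :: pvRowsB rest row') 1) := by
  by_cases hd : row' < 0 ∨ row' > 1
  · rw [if_pos (by tauto)]
    have hb : (!decide (0 ≤ row' ∧ row' ≤ 1)) = true := by simp; omega
    rw [if_pos (Or.inr (by simp; left; omega))]
  · push_neg at hd
    by_cases h7 : pref.length = 7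
    · rw [if_pos (Or.inr (Or.inr (Or.inr (by omega))))]
      rw [if_pos (Or.inl (by simp only [List.length_cons]; omega))]
    · rw [if_neg (by push_neg; refine ⟨hd.1, hd.2, by omega, by omega⟩)]
      have hcol : ((pref.length : Int) + 1) = (((pref ++ [row]).length : Nat) : Int) := by
        simp
      rw [hcol, pvSetCell_new _ _ hd.1 hd.2,
        ih (pref ++ [row]) row' hd.1 hd.2 (by simp; omega)]
      have hb : (!decide (0 ≤ row' ∧ row' ≤ 1)) = false := by simp; omega
      refine if_congr ?_ rfl ?_
      · simp only [List.length_append, List.length_cons, List.length_nil,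
          List.any_cons, hb, Bool.false_or]
        exact or_congr (by omega) Iff.rfl
      · simp [List.append_assoc]

lemma pv_main : ∀ (ms : List Char) (pref : List Int) (row : Int),
    0 ≤ row → row ≤ 1 → pref.length ≤ 7 →
    pvGoA ms row (pref.length : Int) (pvGridOf (pref ++ [row])) =
      (if pref.length + 1 + (pvRowsB ms row).length > 8
          ∨ (pvRowsB ms row).any (fun r => !(decide (0 ≤ r ∧ r ≤ 1))) then "DEATH"
       else pvLineB (pref ++ [row] ++ pvRowsB ms row) 0 ++ "\n"
            ++ pvLineB (pref ++ [row] ++ pvRowsB ms row) 1) := by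
  intro ms
  induction ms with
  | nil =>
    intro pref row h0 h1 hlen
    simp only [pvGoA, pvRowsB]
    rw [if_neg (by simp; omega)]
    simpa using pvRender_eq (pref ++ [row])
  | cons m rest ih =>
    intro pref row h0 h1 hlen
    by_cases hm : m = 'F' ∨ m = 'L' ∨ m = 'R'
    · rcases hm with h | h | h <;> subst h
      · have hrows : pvRowsB ('F' :: rest) row = row :: pvRowsB rest row := by
          simp [pvRowsB, pvDelta]
        have hgo : pvGoA ('F' :: rest) row (pref.length : Int) (pvGridOf (pref ++ [row]))
            = if row < 0 ∨ row > 1 ∨ (pref.length : Int) + 1 < 0 ∨ (pref.length : Int) + 1 > 7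
              then "DEATH"
              else pvGoA rest row ((pref.length : Int) + 1)
                (pvSetCell (pvGridOf (pref ++ [row])) row ((pref.length : Int) + 1)) := rfl
        rw [hgo, hrows]
        exact pv_step rest pref row row hlen ih
      · have hrows : pvRowsB ('L' :: rest) row = (row - 1) :: pvRowsB rest (row - 1) := by
          simp [pvRowsB, pvDelta]; ring_nf; simp
        have hgo : pvGoA ('L' :: rest) row (pref.length : Int) (pvGridOf (pref ++ [row]))
            = if row - 1 < 0 ∨ row - 1 > 1 ∨ (pref.length : Int) + 1 < 0 ∨ (pref.length : Int) + 1 > 7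
              then "DEATH"
              else pvGoA rest (row - 1) ((pref.length : Int) + 1)
                (pvSetCell (pvGridOf (pref ++ [row])) (row - 1) ((pref.length : Int) + 1)) := rfl
        rw [hgo, hrows]
        exact pv_step rest pref row (row - 1) hlen ih
      · have hrows : pvRowsB ('R' :: rest) row = (row + 1) :: pvRowsB rest (row + 1) := by
          simp [pvRowsB, pvDelta]
        have hgo : pvGoA ('R' :: rest) row (pref.length : Int) (pvGridOf (pref ++ [row]))
            = if row + 1 < 0 ∨ row + 1 > 1 ∨ (pref.length : Int) + 1 < 0 ∨ (pref.length : Int) + 1 > 7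
              then "DEATH"
              else pvGoA rest (row + 1) ((pref.length : Int) + 1)
                (pvSetCell (pvGridOf (pref ++ [row])) (row + 1) ((pref.length : Int) + 1)) := rfl
        rw [hgo, hrows]
        exact pv_step rest pref row (row + 1) hlen ih
    · have hF : m ≠ 'F' := fun h => hm (Or.inl h)
      have hL : m ≠ 'L' := fun h => hm (Or.inr (Or.inl h))
      have hR : m ≠ 'R' := fun h => hm (Or.inr (Or.inr h))
      have hrows : pvRowsB (m :: rest) row = pvRowsB rest row := by
        simp only [pvRowsB, if_neg hm]
      have hgo : pvGoA (m :: rest) row (pref.length : Int) (pvGridOf (pref ++ [row]))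
          = pvGoA rest row (pref.length : Int)
              (pvSetCell (pvGridOf (pref ++ [row])) row (pref.length : Int)) := by
        simp only [pvGoA, if_neg hF, if_neg hL, if_neg hR]
        rw [if_neg (by push_neg; refine ⟨h0, h1, by omega, by omega⟩)]
      rw [hgo, hrows, pvSetCell_mem _ _ _ h0 h1
        (by simp)]
      exact ih pref row h0 h1 hlen

-- ===== VERDICT (by name: the statement is the Claim_ definition above) =====
theorem snake_moves_spec : Claim_equal_snake_moves := by
  intro moves _
  show snake_moves moves = snake_moves_alt moves
  unfold snake_moves snake_moves_alt
  have hg : pvSetCell (List.replicate 2 (List.replicate 8 0)) 1 0 = pvGridOf [(1:Int)] := by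
    decide
  rw [hg]
  have hmain := pv_main moves.toList [] 1 (by norm_num) (by norm_num) (by simp)
  simp only [List.length_nil, Nat.cast_zero, List.nil_append, List.singleton_append] at hmain
  rw [hmain]
  refine if_congr ?_ rfl rfl
  simp only [List.length_cons, List.drop_succ_cons, List.drop_zero]
  exact or_congr (by omega) Iff.rfl
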